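-- pv_equiv track=rewrite | github.com/WeihanLikk/MRM-GP | utils.py | get_block_idxs
-- ===== SOURCE A (Python) =====
-- def get_block_idxs(group_dims):
--     num_groups = len(group_dims)
--     block_idxs = []
--     startIdx = 0
--     for i in range(num_groups):
--         group_dim = group_dims[i]
--         endIdx = startIdx + group_dim
--         block_idxs.append([startIdx, endIdx])
--         startIdx = endIdx
--     return block_idxs
-- ===== SOURCE B (Python) =====
-- def get_block_idxs(group_dims):
--     # Build the blocks back-to-front: start from the grand total and walk the
--     # dims in reverse, subtracting each dim to move the right boundary left,
--     # then reverse the collected pairs.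
--     end = sum(group_dims)
--     rev_blocks = []
--     for d in reversed(group_dims):
--         rev_blocks.append([end - d, end])
--         end -= d
--     rev_blocks.reverse()
--     return rev_blocks
-- ===== Notes on version B (the rewrite author's own statement) =====
-- stated objective: alternative
-- what changed: Replaces A's forward pass that threads a running start index upward from 0 with a back-to-front construction: compute the grand total once, traverse the dims in reverse subtracting each dim to move the right boundary leftward, and reverse the collected pairs at the end.
import Mathlib
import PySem

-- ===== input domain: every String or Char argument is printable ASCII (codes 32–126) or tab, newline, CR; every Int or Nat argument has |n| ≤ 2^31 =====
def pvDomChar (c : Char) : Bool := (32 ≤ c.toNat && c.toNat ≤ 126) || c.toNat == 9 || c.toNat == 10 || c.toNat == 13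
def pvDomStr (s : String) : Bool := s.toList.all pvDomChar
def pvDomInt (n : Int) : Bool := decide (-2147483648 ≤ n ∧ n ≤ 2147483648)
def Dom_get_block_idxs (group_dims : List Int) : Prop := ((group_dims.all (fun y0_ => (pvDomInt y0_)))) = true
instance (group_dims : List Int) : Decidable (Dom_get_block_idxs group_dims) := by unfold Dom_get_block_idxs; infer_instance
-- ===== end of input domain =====

-- ===== PORT A =====
-- B replaces A's forward running-start loop with a back-to-front construction from the grand total; objective: alternative.
def get_block_idxs (group_dims : List Int) : List (List Int) :=
  let num_groups : Int := group_dims.length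
  ((PySem.List.pyRange 0 num_groups 1).foldl
    (fun (st : List (List Int) × Int) i =>
      let group_dim := PySem.List.pyGetD group_dims i 0
      let endIdx := st.2 + group_dim
      (st.1 ++ [[st.2, endIdx]], endIdx))
    ([], 0)).1

-- ===== PORT B =====
-- total first, then walk the dims reversed, subtracting; reverse the pairs at the end
def get_block_idxs_alt (group_dims : List Int) : List (List Int) :=
  let e : Int := group_dims.sum
  let st := group_dims.reverse.foldl
    (fun (st : List (List Int) × Int) d =>
      (st.1 ++ [[st.2 - d, st.2]], st.2 - d)) ([], e)
  st.1.reverse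

-- ===== PRECONDITION & SPEC =====
def Spec_get_block_idxs (group_dims : List Int) (out : List (List Int)) : Prop := out = get_block_idxs_alt group_dims
instance (group_dims : List Int) (out : List (List Int)) : Decidable (Spec_get_block_idxs group_dims out) := by unfold Spec_get_block_idxs; infer_instance

-- ===== CLAIM (what is proved, stated in full; the proofs are below) =====
def Claim_equal_get_block_idxs : Prop := ∀ (group_dims : List Int), Dom_get_block_idxs group_dims → Spec_get_block_idxs group_dims (get_block_idxs group_dims)

-- ===== LEMMAS AND PROOFS =====
-- A's forward fold produces the prefix-sum closed form.
lemma gbi_fold_eq (gd : List Int) (s : Int) (acc : List (List Int)) :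
    (gd.foldl
      (fun (st : List (List Int) × Int) d =>
        (st.1 ++ [[st.2, st.2 + d]], st.2 + d)) (acc, s)).1
    = acc ++ (List.range gd.length).map
        (fun i => [s + (gd.take i).sum, s + (gd.take (i + 1)).sum]) := by
  induction gd generalizing s acc with
  | nil => simp
  | cons d t ih =>
    simp only [List.foldl_cons]
    rw [ih]
    simp [List.range_succ_eq_map, List.map_map, Function.comp, add_assoc]

-- B's backward fold (as a foldr) produces the same closed form, reversed.
lemma gbi_foldr_eq (gd : List Int) (s : Int) :
    gd.foldr
      (fun d (st : List (List Int) × Int) =>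
        (st.1 ++ [[st.2 - d, st.2]], st.2 - d)) ([], s)
    = (((List.range gd.length).map
          (fun i => [s - gd.sum + (gd.take i).sum,
                     s - gd.sum + (gd.take (i + 1)).sum])).reverse,
       s - gd.sum) := by
  induction gd generalizing s with
  | nil => simp
  | cons d t ih =>
    simp only [List.foldr_cons]
    rw [ih]
    simp only [List.range_succ_eq_map, List.map_cons, List.map_map, Function.comp_def,
      List.reverse_cons, List.length_cons, List.sum_cons, List.take_succ_cons,
      List.take_zero, List.sum_nil, Prod.mk.injEq]
    refine ⟨?_, by ring⟩
    have h : (fun i => [s - t.sum + (t.take i).sum, s - t.sum + (t.take (i + 1)).sum])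
        = (fun i => [s - (d + t.sum) + (d + (t.take i).sum),
                     s - (d + t.sum) + (d + (t.take (i + 1)).sum)]) := by
      funext i; ring_nf
    rw [h]
    simp
    congr 1
    ring_nf
    exact ⟨trivial, trivial⟩

theorem gbi_alt_closed (gd : List Int) :
    get_block_idxs_alt gd
    = (List.range gd.length).map
        (fun i => [(gd.take i).sum, (gd.take (i + 1)).sum]) := by
  unfold get_block_idxs_alt
  simp only []
  rw [show (List.foldl (fun (st : List (List Int) × Int) d =>
      (st.1 ++ [[st.2 - d, st.2]], st.2 - d)) ([], gd.sum) gd.reverse)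
    = gd.foldr (fun d (st : List (List Int) × Int) =>
      (st.1 ++ [[st.2 - d, st.2]], st.2 - d)) ([], gd.sum)
    from by rw [← List.foldr_reverse, List.reverse_reverse], gbi_foldr_eq]
  simp

-- ===== VERDICT (by name: the statement is the Claim_ definition above) =====
theorem get_block_idxs_spec : Claim_equal_get_block_idxs := by
  intro gd _
  unfold Spec_get_block_idxs
  rw [gbi_alt_closed]
  simp only [get_block_idxs]
  rw [PySem.List.foldl_pyRange_zero_pyGetD' gd 0
    (fun (st : List (List Int) × Int) d => (st.1 ++ [[st.2, st.2 + d]], st.2 + d)) ([], 0)]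
  simpa using gbi_fold_eq gd 0 []
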